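-- pv_equiv track=rewrite | github.com/back8/github_suifengqjn_TTRobot | myselenium/fetchArticle.py | img_txt_count
-- ===== SOURCE A (Python) =====
-- def img_txt_count(s) -> (int, int, list):
--     if '||' not in s:
--         return 0, 0, []
--     arr = s.split('||')
--     t_count = 0
--     i_count = 0
--     res_arr = []
--     for a in arr:
--         if a.startswith("pp--"):
--             t_count += len(a) - 4
--             res_arr.append(a[4:])
--         elif a.startswith("im--"):
--             i_count += 1
--             res_arr.append(a[4:])
--     return (t_count, i_count, res_arr)
-- ===== SOURCE B (Python) =====
-- def _flush(seg, t, i, res):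
--     if seg.startswith("pp--"):
--         return t + len(seg) - 4, i, res + [seg[4:]]
--     if seg.startswith("im--"):
--         return t, i + 1, res + [seg[4:]]
--     return t, i, res
--
--
-- def img_txt_count(s) -> (int, int, list):
--     t, i, res = 0, 0, []
--     buf = []
--     seen_sep = False
--     k = 0
--     n = len(s)
--     while k < n:
--         if s.startswith("||", k):
--             t, i, res = _flush("".join(buf), t, i, res)
--             buf = []
--             seen_sep = True
--             k += 2
--         else:
--             buf.append(s[k])
--             k += 1
--     if not seen_sep:
--         return 0, 0, []
--     return _flush("".join(buf), t, i, res)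
-- ===== Notes on version B (the rewrite author's own statement) =====
-- stated objective: alternative
-- what changed: Replaces the membership test + split on the delimiter + loop over the parts by a single left-to-right character scan: a state machine that buffers the current segment, flushes it (classify as pp--/im--) each time it meets the two-character delimiter, tracks whether any separator was seen, and flushes the tail at the end.
import Mathlib
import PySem

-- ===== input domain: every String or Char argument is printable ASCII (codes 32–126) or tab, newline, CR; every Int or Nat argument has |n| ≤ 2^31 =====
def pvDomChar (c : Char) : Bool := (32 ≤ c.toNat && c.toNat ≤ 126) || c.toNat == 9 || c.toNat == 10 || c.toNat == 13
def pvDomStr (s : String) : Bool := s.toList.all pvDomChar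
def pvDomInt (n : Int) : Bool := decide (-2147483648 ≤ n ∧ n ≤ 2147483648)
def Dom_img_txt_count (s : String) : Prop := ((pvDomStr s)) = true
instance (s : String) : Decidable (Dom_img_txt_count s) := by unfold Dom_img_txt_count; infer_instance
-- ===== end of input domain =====

-- B replaces A's membership test + split("||") + loop over the parts by a single
-- left-to-right character scan (buffer/flush state machine); objective: alternative.


-- ===== PORT A =====
-- the for-loop over arr with state (t_count, i_count, res_arr)
def imgTxtLoopA : List String → Int → Int → List String → Int × Int × List String
  | [], t, i, res => (t, i, res)
  | a :: rest, t, i, res =>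
    if PySem.Str.startswith a "pp--" then
      imgTxtLoopA rest (t + (PySem.Str.len a - 4)) i (res ++ [PySem.Str.slice a (some 4) none])
    else if PySem.Str.startswith a "im--" then
      imgTxtLoopA rest t (i + 1) (res ++ [PySem.Str.slice a (some 4) none])
    else
      imgTxtLoopA rest t i res

def img_txt_count (s : String) : Int × Int × List String :=
  if ¬ PySem.Str.isIn "||" s then (0, 0, [])
  else
    let arr := (PySem.Str.split? s "||").getD []   -- sep "||" ≠ "", so split? is always some
    imgTxtLoopA arr 0 0 []

-- ===== PORT B =====
-- Source B's _flush(seg, t, i, res): classify one finished segment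
def pvFlush (seg : List Char) (t i : Int) (res : List String) : Int × Int × List String :=
  if PySem.Chars.startswith seg ['p','p','-','-'] then
    (t + (seg.length : Int) - 4, i, res ++ [String.ofList (PySem.Chars.slice seg (some 4) none)])
  else if PySem.Chars.startswith seg ['i','m','-','-'] then
    (t, i + 1, res ++ [String.ofList (PySem.Chars.slice seg (some 4) none)])
  else (t, i, res)

-- Source B's while-loop over index k, transcribed as recursion over the remaining characters
def pvScan : List Char → List Char → Bool → Int → Int → List String → Int × Int × List String
  | [], buf, seen, t, i, res =>
      if seen then pvFlush buf t i res else (0, 0, [])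
  | c :: rest, buf, seen, t, i, res =>
      if PySem.Chars.startswith (c :: rest) ['|','|'] then
        match pvFlush buf t i res with
        | (t', i', res') => pvScan (rest.drop 1) [] true t' i' res'
      else pvScan rest (buf ++ [c]) seen t i res
termination_by l => l.length
decreasing_by all_goals simp; try omega

def img_txt_count_alt (s : String) : Int × Int × List String :=
  pvScan s.toList [] false 0 0 []

-- ===== PRECONDITION & SPEC =====
def Spec_img_txt_count (s : String) (out : Int × Int × List String) : Prop := out = img_txt_count_alt s
instance (s : String) (out : Int × Int × List String) : Decidable (Spec_img_txt_count s out) := by unfold Spec_img_txt_count; infer_instance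

-- ===== CLAIM (what is proved, stated in full; the proofs are below) =====
def Claim_equal_img_txt_count : Prop := ∀ (s : String), Dom_img_txt_count s → Spec_img_txt_count s (img_txt_count s)

-- ===== LEMMAS AND PROOFS =====

-- the list of segments of l delimited by "||" (matches Python split semantics)
def segsOf : List Char → List (List Char)
  | [] => [[]]
  | c :: rest =>
      if PySem.Chars.startswith (c :: rest) ['|','|'] then [] :: segsOf (rest.drop 1)
      else
        match segsOf rest with
        | s0 :: ss => (c :: s0) :: ss
        | [] => [[c]]
termination_by l => l.length
decreasing_by all_goals simp; try omega

def consHead (p : List Char) : List (List Char) → List (List Char)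
  | [] => [p]
  | s0 :: ss => (p ++ s0) :: ss

def pvStep (st : Int × Int × List String) (seg : List Char) : Int × Int × List String :=
  pvFlush seg st.1 st.2.1 st.2.2

theorem segsOf_nil : segsOf [] = [[]] := by rw [segsOf]

theorem segsOf_cons (c : Char) (rest : List Char) :
    segsOf (c :: rest) =
      if PySem.Chars.startswith (c :: rest) ['|','|'] then [] :: segsOf (rest.drop 1)
      else match segsOf rest with | s0 :: ss => (c :: s0) :: ss | [] => [[c]] := by
  rw [segsOf]

theorem segsOf_ne_nil (l : List Char) : segsOf l ≠ [] := by
  cases l with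
  | nil => rw [segsOf_nil]; simp
  | cons c rest =>
    rw [segsOf_cons]
    split
    · simp
    · rcases segsOf rest with _ | ⟨s0, ss⟩ <;> simp

theorem go_eq (fuel : Nat) : ∀ (l cur : List Char) (acc : List (List Char)),
    l.length < fuel →
    PySem.Chars.splitOn.go ['|','|'] fuel l cur acc =
      acc.reverse ++ consHead cur.reverse (segsOf l) := by
  induction fuel with
  | zero => intro l cur acc h; omega
  | succ f ih =>
    intro l cur acc h
    cases l with
    | nil => simp [PySem.Chars.splitOn.go, segsOf, consHead]
    | cons c rest =>
      by_cases hp : (['|','|'] : List Char).isPrefixOf (c :: rest) = true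
      · have hlen : (List.drop 1 rest).length < f := by
          simp at h ⊢; omega
        have := ih (rest.drop 1) [] (cur.reverse :: acc) hlen
        simp only [PySem.Chars.splitOn.go, hp, if_true]
        rw [show List.drop (['|','|'] : List Char).length (c :: rest) = rest.drop 1 by simp]
        rw [this]
        rw [show segsOf (c :: rest) = [] :: segsOf (rest.drop 1) by
          rw [segsOf_cons, if_pos (by simpa [PySem.Chars.startswith] using hp)]]
        rcases h0 : segsOf (rest.drop 1) with _ | ⟨s0, ss⟩
        · exact absurd h0 (segsOf_ne_nil _)
        · simp [consHead]
      · have hlen : rest.length < f := by simp at h; omega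
        have := ih rest (c :: cur) acc hlen
        simp only [PySem.Chars.splitOn.go, hp]
        rw [this]
        rw [show segsOf (c :: rest) = (match segsOf rest with
              | s0 :: ss => (c :: s0) :: ss | [] => [[c]]) by
          rw [segsOf_cons, if_neg (by simpa [PySem.Chars.startswith] using hp)]]
        rcases h0 : segsOf rest with _ | ⟨s0, ss⟩
        · exact absurd h0 (segsOf_ne_nil _)
        · simp [consHead]

theorem splitOn_eq_segsOf (l : List Char) :
    PySem.Chars.splitOn l ['|','|'] = segsOf l := by
  have := go_eq (l.length + 1) l [] [] (by omega)
  rw [PySem.Chars.splitOn, this]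
  rcases h0 : segsOf l with _ | ⟨s0, ss⟩
  · exact absurd h0 (segsOf_ne_nil _)
  · simp [consHead]

theorem loopA_eq_fold (segs : List (List Char)) : ∀ (t i : Int) (res : List String),
    imgTxtLoopA (segs.map String.ofList) t i res = List.foldl pvStep (t, i, res) segs := by
  induction segs with
  | nil => intro t i res; simp [imgTxtLoopA]
  | cons seg rest ih =>
    intro t i res
    simp only [List.map_cons, List.foldl_cons]
    by_cases hp : PySem.Chars.startswith seg ['p','p','-','-'] = true <;>
      by_cases hi : PySem.Chars.startswith seg ['i','m','-','-'] = true
    all_goals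
      simp [imgTxtLoopA, PySem.Str.startswith, PySem.Str.len, PySem.Str.slice, hp, hi, ih,
        pvStep, pvFlush]
    · -- impossible: a segment cannot start with both "pp--" and "im--"
      exfalso
      rw [PySem.Chars.startswith_iff] at hp hi
      obtain ⟨u, hu⟩ := hp
      obtain ⟨v, hv⟩ := hi
      rw [← hu] at hv
      simp at hv
    · ring_nf

theorem scan_true (n : Nat) : ∀ (l : List Char), l.length ≤ n →
    ∀ (buf : List Char) (t i : Int) (res : List String),
    pvScan l buf true t i res = List.foldl pvStep (t, i, res) (consHead buf (segsOf l)) := by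
  induction n with
  | zero =>
    intro l hl buf t i res
    have : l = [] := List.length_eq_zero_iff.mp (Nat.le_zero.mp hl)
    subst this
    rw [pvScan]; simp [segsOf_nil, consHead, pvStep]
  | succ n ih =>
    intro l hl buf t i res
    cases l with
    | nil => rw [pvScan]; simp [segsOf_nil, consHead, pvStep]
    | cons c rest =>
      by_cases hp : PySem.Chars.startswith (c :: rest) ['|','|'] = true
      · have hlen : (rest.drop 1).length ≤ n := by simp at hl ⊢; omega
        simp only [pvScan, hp, if_true]
        rw [show segsOf (c :: rest) = [] :: segsOf (rest.drop 1) by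
          rw [segsOf_cons, if_pos hp]]
        rcases hf : pvFlush buf t i res with ⟨t', i', res'⟩
        rw [ih (rest.drop 1) hlen [] t' i' res']
        rcases h0 : segsOf (rest.drop 1) with _ | ⟨s0, ss⟩
        · exact absurd h0 (segsOf_ne_nil _)
        · simp [consHead, pvStep, hf]
      · have hlen : rest.length ≤ n := by simp at hl; omega
        simp only [pvScan, hp]
        rw [ih rest hlen (buf ++ [c]) t i res]
        rw [show segsOf (c :: rest) = (match segsOf rest with
              | s0 :: ss => (c :: s0) :: ss | [] => [[c]]) by
          rw [segsOf_cons, if_neg hp]]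
        rcases h0 : segsOf rest with _ | ⟨s0, ss⟩
        · exact absurd h0 (segsOf_ne_nil _)
        · simp [consHead]

theorem scan_false (n : Nat) : ∀ (l : List Char), l.length ≤ n →
    ∀ (buf : List Char) (t i : Int) (res : List String),
    pvScan l buf false t i res =
      if PySem.Chars.isIn ['|','|'] l then
        List.foldl pvStep (t, i, res) (consHead buf (segsOf l))
      else (0, 0, []) := by
  induction n with
  | zero =>
    intro l hl buf t i res
    have : l = [] := List.length_eq_zero_iff.mp (Nat.le_zero.mp hl)
    subst this
    have : PySem.Chars.isIn ['|','|'] [] = false := by decide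
    simp [pvScan, this]
  | succ n ih =>
    intro l hl buf t i res
    cases l with
    | nil =>
      have : PySem.Chars.isIn ['|','|'] [] = false := by decide
      simp [pvScan, this]
    | cons c rest =>
      by_cases hp : PySem.Chars.startswith (c :: rest) ['|','|'] = true
      · have hin : PySem.Chars.isIn ['|','|'] (c :: rest) = true := by
          rw [PySem.Chars.isIn_iff_infix]
          rw [PySem.Chars.startswith_iff] at hp
          exact hp.isInfix
        have hlen : (rest.drop 1).length ≤ n := by simp at hl ⊢; omega
        simp only [pvScan, hp, if_true, hin]
        rcases hf : pvFlush buf t i res with ⟨t', i', res'⟩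
        rw [scan_true n (rest.drop 1) hlen [] t' i' res']
        rw [show segsOf (c :: rest) = [] :: segsOf (rest.drop 1) by
          rw [segsOf_cons, if_pos hp]]
        rcases h0 : segsOf (rest.drop 1) with _ | ⟨s0, ss⟩
        · exact absurd h0 (segsOf_ne_nil _)
        · simp [consHead, pvStep, hf]
      · have hin : PySem.Chars.isIn ['|','|'] (c :: rest) = PySem.Chars.isIn ['|','|'] rest := by
          rcases h : PySem.Chars.isIn ['|','|'] rest with _ | _
          · rw [PySem.Chars.isIn_eq_false_iff] at h ⊢
            intro hcontra
            rcases (List.infix_cons_iff).mp hcontra with h1 | h2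
            · exact hp (by rw [PySem.Chars.startswith_iff]; exact h1)
            · exact h h2
          · rw [PySem.Chars.isIn_iff_infix] at h ⊢
            exact (List.infix_cons_iff).mpr (Or.inr h)
        have hlen : rest.length ≤ n := by simp at hl; omega
        simp only [pvScan, hp, hin]
        rw [ih rest hlen (buf ++ [c]) t i res]
        rcases h : PySem.Chars.isIn ['|','|'] rest with _ | _
        · simp
        · simp only [if_true]
          rw [show segsOf (c :: rest) = (match segsOf rest with
                | s0 :: ss => (c :: s0) :: ss | [] => [[c]]) by
            rw [segsOf_cons, if_neg hp]]
          rcases h0 : segsOf rest with _ | ⟨s0, ss⟩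
          · exact absurd h0 (segsOf_ne_nil _)
          · simp [consHead]

-- ===== VERDICT (by name: the statement is the Claim_ definition above) =====
theorem img_txt_count_spec : Claim_equal_img_txt_count := by
  intro s _hDom
  unfold Spec_img_txt_count img_txt_count img_txt_count_alt
  have htl : ("||" : String).toList = ['|','|'] := by decide
  have hisin : PySem.Str.isIn "||" s = PySem.Chars.isIn ['|','|'] s.toList := by
    rw [PySem.Str.isIn, htl]
  rw [scan_false s.toList.length s.toList (le_refl _) [] 0 0 []]
  by_cases h : PySem.Chars.isIn ['|','|'] s.toList = true
  · simp only [hisin, h, if_true, not_true, if_false]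
    have hsplit : (PySem.Str.split? s "||").getD [] =
        (segsOf s.toList).map String.ofList := by
      rw [PySem.Str.split?, htl, PySem.Chars.split?]
      simp [splitOn_eq_segsOf]
    rw [hsplit, loopA_eq_fold]
    rcases h0 : segsOf s.toList with _ | ⟨s0, ss⟩
    · exact absurd h0 (segsOf_ne_nil _)
    · simp [consHead]
  · simp only [hisin] at *
    simp [h]
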